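-- pv_equiv track=rewrite | github.com/hnpl/project-euler | 8th_100/problem712.py | calculate_pairwise_difference
-- ===== SOURCE A (Python) =====
-- MOD = 10**9 + 7
--
-- def calculate_pairwise_difference(arr):
--     ans = 0
--     n = len(arr)
--     for i in range(n):
--         for j in range(i+1, n):
--             ans += (j - i) * arr[j] * arr[i]
--             ans %= MOD
--     return ans
-- ===== SOURCE B (Python) =====
-- MOD = 10**9 + 7
--
-- def calculate_pairwise_difference(arr):
--     # One pass with running prefix sums: sum_{i<j}(j-i)a_i a_j = sum_j a_j*(j*S_j - T_j)
--     s = 0      # sum of a_i for i < j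
--     t = 0      # sum of i*a_i for i < j
--     total = 0
--     for j, a in enumerate(arr):
--         total += a * (j * s - t)
--         s += a
--         t += j * a
--     return total % MOD
-- ===== Notes on version B (the rewrite author's own statement) =====
-- stated objective: faster
-- what changed: Replaces the O(n^2) double loop over index pairs by a single pass that keeps running prefix sums S=sum(a_i) and T=sum(i*a_i), adding a_j*(j*S - T) for each j, with one final mod.
import Mathlib
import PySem

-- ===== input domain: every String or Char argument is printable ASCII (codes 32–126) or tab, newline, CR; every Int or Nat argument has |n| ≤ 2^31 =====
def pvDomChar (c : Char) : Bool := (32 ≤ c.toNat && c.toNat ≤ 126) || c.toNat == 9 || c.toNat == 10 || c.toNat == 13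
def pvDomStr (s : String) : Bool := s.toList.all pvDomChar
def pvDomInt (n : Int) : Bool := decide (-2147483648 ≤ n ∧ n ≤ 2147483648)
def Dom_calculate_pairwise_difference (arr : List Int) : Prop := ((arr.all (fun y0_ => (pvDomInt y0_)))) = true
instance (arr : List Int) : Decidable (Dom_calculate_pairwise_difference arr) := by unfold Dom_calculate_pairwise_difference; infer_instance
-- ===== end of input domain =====

-- B replaces A's O(n^2) double loop by a single pass carrying prefix sums of a_i and i*a_i.

-- ===== PORT A =====
-- MOD = 10**9 + 7
def pvMOD : Int := 10 ^ 9 + 7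

-- literal port of A: nested index ranges; ans += (j-i)*arr[j]*arr[i]; ans %= MOD each step
def calculate_pairwise_difference (arr : List Int) : Int :=
  let n : Int := arr.length
  (PySem.List.pyRange 0 n 1).foldl
    (fun ans i =>
      (PySem.List.pyRange (i + 1) n 1).foldl
        (fun ans j =>
          PySem.Int.mod (ans + (j - i) * PySem.List.pyGetD arr j 0 * PySem.List.pyGetD arr i 0) pvMOD)
        ans)
    0

-- ===== PORT B =====
-- literal port of B: one pass over enumerate(arr) with state (s, t, total); final total % MOD
def calculate_pairwise_difference_alt (arr : List Int) : Int :=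
  let st :=
    (PySem.List.enumerate arr 0).foldl
      (fun (st : Int × Int × Int) (ja : Int × Int) =>
        (st.1 + ja.2, st.2.1 + ja.1 * ja.2, st.2.2 + ja.2 * (ja.1 * st.1 - st.2.1)))
      (0, 0, 0)
  PySem.Int.mod st.2.2 pvMOD

-- ===== PRECONDITION & SPEC =====
def Spec_calculate_pairwise_difference (arr : List Int) (out : Int) : Prop := out = calculate_pairwise_difference_alt arr
instance (arr : List Int) (out : Int) : Decidable (Spec_calculate_pairwise_difference arr out) := by unfold Spec_calculate_pairwise_difference; infer_instance

-- ===== CLAIM (what is proved, stated in full; the proofs are below) =====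
def Claim_equal_calculate_pairwise_difference : Prop := ∀ (arr : List Int), Dom_calculate_pairwise_difference arr → Spec_calculate_pairwise_difference arr (calculate_pairwise_difference arr)

-- ===== LEMMAS AND PROOFS =====

-- the pair term, with Nat indices
def pvTerm (arr : List Int) (i j : ℕ) : Int :=
  ((j : Int) - (i : Int)) * arr.getD j 0 * arr.getD i 0

-- weighted prefix sum Σ i·a_i
def pvT (arr : List Int) : Int :=
  ∑ i ∈ Finset.range arr.length, (i : Int) * arr.getD i 0

-- the exact pair sum, grouped by the second index (B's grouping)
def pvP (arr : List Int) : Int :=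
  ∑ j ∈ Finset.range arr.length, ∑ i ∈ Finset.range j, pvTerm arr i j

lemma pv_mod_pos : (0:Int) < pvMOD := by unfold pvMOD; norm_num

-- mod-threading: a fold that reduces after every addition is the sum reduced once
lemma pv_modfold (l : List Int) (a : Int) :
    l.foldl (fun ans x => PySem.Int.mod (ans + x) pvMOD) (PySem.Int.mod a pvMOD)
      = PySem.Int.mod (a + l.sum) pvMOD := by
  induction l generalizing a with
  | nil => simp
  | cons x xs ih =>
    simp only [List.foldl_cons, List.sum_cons]
    have h : PySem.Int.mod (PySem.Int.mod a pvMOD + x) pvMOD = PySem.Int.mod (a + x) pvMOD := by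
      rw [PySem.Int.mod_eq_emod_of_pos pv_mod_pos, PySem.Int.mod_eq_emod_of_pos pv_mod_pos,
          PySem.Int.mod_eq_emod_of_pos pv_mod_pos, Int.emod_add_emod]
    rw [h, ih (a + x)]
    ring_nf

-- nested mod-folds: thread the mod through the outer loop as well
lemma pv_outer (l : List Int) (H : Int → List Int) (c : Int) :
    l.foldl (fun ans i => (H i).foldl (fun ans x => PySem.Int.mod (ans + x) pvMOD) ans)
      (PySem.Int.mod c pvMOD)
      = PySem.Int.mod (c + (l.map (fun i => (H i).sum)).sum) pvMOD := by
  induction l generalizing c with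
  | nil => simp
  | cons i is ih =>
    simp only [List.foldl_cons, List.map_cons, List.sum_cons]
    rw [pv_modfold, ih]
    ring_nf

lemma pv_sum_map_range (n : ℕ) (g : ℕ → Int) :
    ((List.range n).map g).sum = ∑ k ∈ Finset.range n, g k := rfl

-- sum over a Python range as a Finset.Ico sum
lemma pv_sum_pyRange (a b : Int) (ha : 0 ≤ a) (f : Int → Int) :
    ((PySem.List.pyRange a b 1).map f).sum = ∑ j ∈ Finset.Ico a.toNat b.toNat, f (j : Int) := by
  obtain ⟨m, rfl⟩ := Int.eq_ofNat_of_zero_le ha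
  rw [PySem.List.pyRange_one, List.map_map, pv_sum_map_range, Finset.sum_Ico_eq_sum_range]
  have hn : (((b : Int) - (m : Int))).toNat = b.toNat - m := by omega
  rw [hn]
  refine Finset.sum_congr rfl (fun k _ => ?_)
  simp only [Function.comp_apply]
  congr 1

-- A's value is the pair sum (grouped by the first index) reduced mod MOD
lemma pv_A_eq (arr : List Int) :
    calculate_pairwise_difference arr
      = PySem.Int.mod
          (∑ i ∈ Finset.range arr.length, ∑ j ∈ Finset.Ico (i+1) arr.length, pvTerm arr i j)
          pvMOD := by
  have h0 : PySem.Int.mod 0 pvMOD = (0:Int) := by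
    rw [PySem.Int.mod_eq_emod_of_pos pv_mod_pos]; simp
  show (PySem.List.pyRange 0 (arr.length : Int) 1).foldl
    (fun ans i =>
      (PySem.List.pyRange (i + 1) (arr.length : Int) 1).foldl
        (fun ans j =>
          PySem.Int.mod (ans + (j - i) * PySem.List.pyGetD arr j 0 * PySem.List.pyGetD arr i 0) pvMOD)
        ans) 0 = _
  have hbody : (fun (ans i : Int) =>
      (PySem.List.pyRange (i + 1) (arr.length : Int) 1).foldl
        (fun ans j =>
          PySem.Int.mod (ans + (j - i) * PySem.List.pyGetD arr j 0 * PySem.List.pyGetD arr i 0) pvMOD)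
        ans)
      = (fun (ans i : Int) =>
        ((PySem.List.pyRange (i + 1) (arr.length : Int) 1).map
          (fun j => (j - i) * PySem.List.pyGetD arr j 0 * PySem.List.pyGetD arr i 0)).foldl
          (fun ans x => PySem.Int.mod (ans + x) pvMOD) ans) := by
    funext ans i; rw [List.foldl_map]
  rw [hbody]
  have houter := pv_outer (PySem.List.pyRange 0 (arr.length : Int) 1)
    (fun i => ((PySem.List.pyRange (i + 1) (arr.length : Int) 1).map
      (fun j => (j - i) * PySem.List.pyGetD arr j 0 * PySem.List.pyGetD arr i 0))) 0
  rw [h0] at houter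
  rw [houter, zero_add]
  congr 1
  rw [pv_sum_pyRange 0 (arr.length : Int) le_rfl]
  simp only [Int.toNat_zero, Int.toNat_natCast, ← Finset.range_eq_Ico]
  refine Finset.sum_congr rfl (fun i _ => ?_)
  have hcast : ((i : Int) + 1) = (((i + 1 : ℕ) : Int)) := by push_cast; ring
  rw [hcast, pv_sum_pyRange ((i + 1 : ℕ) : Int) (arr.length : Int) (by positivity)]
  simp only [Int.toNat_natCast]
  refine Finset.sum_congr rfl (fun j _ => ?_)
  simp [pvTerm, PySem.List.pyGetD_natCast]

-- list sum as an indexed Finset sum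
lemma pv_sum_getD (xs : List Int) :
    xs.sum = ∑ i ∈ Finset.range xs.length, xs.getD i 0 := by
  induction xs using List.reverseRecOn with
  | nil => simp
  | append_singleton xs a ih =>
    rw [List.sum_append, List.length_append]
    simp only [List.length_cons, List.length_nil, List.sum_cons, List.sum_nil]
    rw [Finset.sum_range_succ]
    have h1 : ∀ i ∈ Finset.range xs.length, (xs ++ [a]).getD i 0 = xs.getD i 0 := by
      intro i hi
      exact List.getD_append _ _ _ _ (Finset.mem_range.mp hi)
    have h2 : (xs ++ [a]).getD xs.length 0 = a := by
      rw [List.getD_append_right _ _ _ _ le_rfl]; simp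
    rw [Finset.sum_congr rfl h1, h2, ih]
    ring

-- the weighted sum after appending one element
lemma pv_T_snoc (xs : List Int) (a : Int) :
    pvT (xs ++ [a]) = pvT xs + (xs.length : Int) * a := by
  unfold pvT
  rw [List.length_append]
  simp only [List.length_cons, List.length_nil]
  rw [Finset.sum_range_succ]
  have h1 : ∀ i ∈ Finset.range xs.length,
      (i : Int) * (xs ++ [a]).getD i 0 = (i : Int) * xs.getD i 0 := by
    intro i hi
    rw [List.getD_append _ _ _ _ (Finset.mem_range.mp hi)]
  have h2 : (xs ++ [a]).getD xs.length 0 = a := by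
    rw [List.getD_append_right _ _ _ _ le_rfl]; simp
  rw [Finset.sum_congr rfl h1, h2]

-- the pair sum after appending one element
lemma pv_P_snoc (xs : List Int) (a : Int) :
    pvP (xs ++ [a]) = pvP xs + a * ((xs.length : Int) * xs.sum - pvT xs) := by
  unfold pvP
  rw [List.length_append]
  simp only [List.length_cons, List.length_nil]
  rw [Finset.sum_range_succ]
  have hget : ∀ i, i < xs.length → (xs ++ [a]).getD i 0 = xs.getD i 0 := by
    intro i hi; exact List.getD_append _ _ _ _ hi
  have hgetn : (xs ++ [a]).getD xs.length 0 = a := by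
    rw [List.getD_append_right _ _ _ _ le_rfl]; simp
  have h1 : ∀ j ∈ Finset.range xs.length,
      (∑ i ∈ Finset.range j, pvTerm (xs ++ [a]) i j) = ∑ i ∈ Finset.range j, pvTerm xs i j := by
    intro j hj
    refine Finset.sum_congr rfl (fun i hi => ?_)
    unfold pvTerm
    rw [hget j (Finset.mem_range.mp hj),
        hget i (lt_trans (Finset.mem_range.mp hi) (Finset.mem_range.mp hj))]
  have h2 : (∑ i ∈ Finset.range xs.length, pvTerm (xs ++ [a]) i xs.length)
      = a * ((xs.length : Int) * xs.sum - pvT xs) := by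
    have hstep : ∀ i ∈ Finset.range xs.length,
        pvTerm (xs ++ [a]) i xs.length
          = a * ((xs.length : Int) * xs.getD i 0) - a * ((i : Int) * xs.getD i 0) := by
      intro i hi
      unfold pvTerm
      rw [hgetn, hget i (Finset.mem_range.mp hi)]
      ring
    rw [Finset.sum_congr rfl hstep, Finset.sum_sub_distrib, ← Finset.mul_sum, ← Finset.mul_sum,
        ← Finset.mul_sum, pv_sum_getD xs]
    unfold pvT
    ring
  rw [Finset.sum_congr rfl h1, h2]

-- B's fold invariant: the state is (Σ a_i, Σ i·a_i, pair sum)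
lemma pv_B_fold (arr : List Int) :
    (PySem.List.enumerate arr 0).foldl
      (fun (st : Int × Int × Int) (ja : Int × Int) =>
        (st.1 + ja.2, st.2.1 + ja.1 * ja.2, st.2.2 + ja.2 * (ja.1 * st.1 - st.2.1)))
      (0, 0, 0)
      = (arr.sum, pvT arr, pvP arr) := by
  induction arr using List.reverseRecOn with
  | nil => simp [pvT, pvP]
  | append_singleton xs a ih =>
    rw [PySem.List.enumerate_append, List.foldl_append, ih]
    simp only [PySem.List.enumerate_cons, PySem.List.enumerate_nil, List.foldl_cons, List.foldl_nil]
    rw [List.sum_append, pv_T_snoc, pv_P_snoc]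
    simp only [List.sum_cons, List.sum_nil]
    simp

-- swap the grouping: A sums by first index, B by second
lemma pv_swap (arr : List Int) :
    ∑ i ∈ Finset.range arr.length, ∑ j ∈ Finset.Ico (i+1) arr.length, pvTerm arr i j
      = pvP arr := by
  unfold pvP
  rw [Finset.range_eq_Ico, Finset.sum_Ico_Ico_comm']

-- ===== VERDICT (by name: the statement is the Claim_ definition above) =====
theorem calculate_pairwise_difference_spec : Claim_equal_calculate_pairwise_difference := by
  intro arr _
  unfold Spec_calculate_pairwise_difference calculate_pairwise_difference_alt
  rw [pv_B_fold, pv_A_eq, pv_swap]
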